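-- pv_equiv track=rewrite | github.com/david-crespo/aoc | 2021/python/day18.py | find_exp
-- ===== SOURCE A (Python) =====
-- def find_exp(x):
--     ct = 0
--     for i in range(len(x)):
--         c = x[i]
--         if ct == 4 and c == "[":
--             return i
--         if c == "[":
--             ct += 1
--         elif c == "]":
--             ct -= 1
--     return None
-- ===== SOURCE B (Python) =====
-- def find_exp(x):
--     # Pass 1: table of nesting depth *before* each character.
--     depth_before = []
--     d = 0
--     for c in x:
--         depth_before.append(d)
--         d += (c == "[") - (c == "]")
--     # Pass 2: first index whose char is '[' opened at depth 4.
--     for i, c in enumerate(x):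
--         if depth_before[i] == 4 and c == "[":
--             return i
--     return None
-- ===== Notes on version B (the rewrite author's own statement) =====
-- stated objective: alternative
-- what changed: Replaces the single inline depth-tracking loop with a two-phase decomposition: first build a depth-before table over the string, then scan for the first index with depth 4 and an opening bracket.
import Mathlib
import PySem

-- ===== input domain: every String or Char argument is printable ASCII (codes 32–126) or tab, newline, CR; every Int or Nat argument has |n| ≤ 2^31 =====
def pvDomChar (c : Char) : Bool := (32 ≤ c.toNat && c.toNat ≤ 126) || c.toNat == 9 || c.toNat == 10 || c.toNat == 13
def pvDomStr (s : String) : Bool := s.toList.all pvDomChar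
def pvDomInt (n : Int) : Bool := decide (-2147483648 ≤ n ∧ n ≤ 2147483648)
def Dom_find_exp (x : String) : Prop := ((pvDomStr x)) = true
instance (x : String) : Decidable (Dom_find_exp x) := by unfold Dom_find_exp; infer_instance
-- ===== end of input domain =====

-- B is the same O(n) task decomposed into two passes (depth table, then search); equivalence of the two is proved below.

-- ===== PORT A =====
-- loop over indices with inline depth counter ct
def find_exp_go (cs : List Char) (i : Int) (ct : Int) : Option Int :=
  match cs with
  | [] => none
  | c :: rest =>
    if ct = 4 ∧ c = '[' then some i
    else if c = '[' then find_exp_go rest (i + 1) (ct + 1)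
    else if c = ']' then find_exp_go rest (i + 1) (ct - 1)
    else find_exp_go rest (i + 1) ct

def find_exp (x : String) : Option Int := find_exp_go x.toList 0 0

-- ===== PORT B =====
-- pass 1 of Source B: depth-before table
def buildDepths (cs : List Char) (d : Int) : List Int :=
  match cs with
  | [] => []
  | c :: rest =>
      d :: buildDepths rest (d + ((if c = '[' then 1 else 0) - (if c = ']' then 1 else 0)))

-- pass 2 of Source B: scan chars alongside the table
def searchDepth4 (cs : List Char) (ds : List Int) (i : Int) : Option Int :=
  match cs, ds with
  | c :: cs', d :: ds' =>
      if d = 4 ∧ c = '[' then some i else searchDepth4 cs' ds' (i + 1)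
  | _, _ => none

def find_exp_alt (x : String) : Option Int :=
  searchDepth4 x.toList (buildDepths x.toList 0) 0

-- ===== PRECONDITION & SPEC =====
def Spec_find_exp (x : String) (out : Option Int) : Prop := out = find_exp_alt x
instance (x : String) (out : Option Int) : Decidable (Spec_find_exp x out) := by unfold Spec_find_exp; infer_instance

-- ===== CLAIM (what is proved, stated in full; the proofs are below) =====
def Claim_equal_find_exp : Prop := ∀ (x : String), Dom_find_exp x → Spec_find_exp x (find_exp x)

-- ===== LEMMAS AND PROOFS =====
theorem find_exp_go_eq (cs : List Char) (i ct : Int) :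
    find_exp_go cs i ct = searchDepth4 cs (buildDepths cs ct) i := by
  induction cs generalizing i ct with
  | nil => rfl
  | cons c rest ih =>
      simp only [find_exp_go, buildDepths, searchDepth4]
      by_cases h4 : ct = 4 ∧ c = '['
      · simp [h4]
      · simp only [if_neg h4]
        by_cases ho : c = '['
        · simp [ho, ih]
        · by_cases hc : c = ']'
          · simp [ho, hc, ih, sub_eq_add_neg]
          · simp [ho, hc, ih]

-- ===== VERDICT (by name: the statement is the Claim_ definition above) =====
theorem find_exp_spec : Claim_equal_find_exp := by
  intro x _
  unfold Spec_find_exp find_exp find_exp_alt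
  exact find_exp_go_eq _ _ _
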